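-- pv_equiv track=rewrite | github.com/possee-org/genai-numpy | tools/tracking-lists/create_task_table.py | create_task_table
-- ===== SOURCE A (Python) =====
-- def create_task_table(task_list, num_columns, group_name = "Groups Names"):
--     # Prepend "- [ ] " to each task
--     # task_list = [f"- [ ] {task}" for task in task_list]
--
--     # Calculate the maximum column width
--     headers = [f"Group {i + 1}" for i in range(num_columns)]
--     col_width = max(max(len(task) for task in task_list), max(len(header) for header in headers))
--
--     # Calculate the number of chunks needed
--     num_items_per_chunk = 10 * num_columns
--     total_chunks = (len(task_list) + num_items_per_chunk - 1) // num_items_per_chunk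
--
--     # Initialize the table parts
--     table_parts = []
--     group_names = []
--     header_count = 1
--
--     for chunk in range(total_chunks):
--         chunk_start = chunk * num_items_per_chunk
--         chunk_end = min(chunk_start + num_items_per_chunk, len(task_list))
--         chunk_tasks = task_list[chunk_start:chunk_end]
--
--         # Determine the number of columns for the current chunk
--         num_columns_current = min(num_columns, (chunk_end - chunk_start + 9) // 10)
--
--         # Initialize the table header and the separator line for the current chunk
--         headers = [f"Group {header_count + i}" for i in range(num_columns_current)]
--         header = "| " + " | ".join(header.ljust(col_width) for header in headers) + " |"
--         separator = "| " + " | ".join(["-" * col_width for _ in headers]) + " |"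
--
--         # Create rows for the current chunk
--         rows = []
--         for row_index in range(10):
--             row = []
--             for col_index in range(num_columns_current):
--                 task_index = row_index + col_index * 10
--                 if task_index < len(chunk_tasks):
--                     row.append(chunk_tasks[task_index].ljust(col_width))
--                 else:
--                     row.append(" " * col_width)
--             if row:
--                 rows.append("| " + " | ".join(row) + " |")
--
--         # Combine all parts of the current chunk
--         table_chunk = "\n".join([header, separator] + rows)
--         table_parts.append(table_chunk)
--
--         # Add group names to the list
--         group_names.extend(headers)
--
--         # Increment the header count
--         header_count += num_columns_current
--
--     # Combine all chunks into the final table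
--     table = "\n\n".join(table_parts)
--
--     # Print the group names with prepended "- [ ] "
--     group_names_output = group_name + ":\n" + "\n".join([f"- [ ] {group}" for group in group_names])
--
--     return f"{group_names_output}\n\n{table}"
-- ===== SOURCE B (Python) =====
-- def create_task_table(task_list, num_columns, group_name="Groups Names"):
--     width = max(max(len(t) for t in task_list),
--                 max(len("Group %d" % (i + 1)) for i in range(num_columns)))
--     blank = " " * width
--     # split the flat list into fixed 10-cell columns, padded with blank cells
--     cols = [[t.ljust(width) for t in task_list[s:s + 10]] for s in range(0, len(task_list), 10)]
--     cols = [c + [blank] * (10 - len(c)) for c in cols]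
--     names = ["Group %d" % (i + 1) for i in range(len(cols))]
--     parts = []
--     for k in range(0, len(cols), num_columns):
--         block = cols[k:k + num_columns]
--         hdrs = names[k:k + num_columns]
--         lines = ["| " + " | ".join(h.ljust(width) for h in hdrs) + " |",
--                  "| " + " | ".join(["-" * width] * len(block)) + " |"]
--         lines += ["| " + " | ".join(cells) + " |" for cells in zip(*block)]
--         parts.append("\n".join(lines))
--     return (group_name + ":\n" + "\n".join("- [ ] " + g for g in names)
--             + "\n\n" + "\n\n".join(parts))
-- ===== Notes on version B (the rewrite author's own statement) =====
-- stated objective: alternative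
-- what changed: Instead of iterating chunks of the flat list and gathering each cell by row/column index arithmetic with a running header counter, B first splits the whole list once into global padded 10-cell columns, numbers every group name up front from the column count, then slices the column list into blocks of num_columns and obtains each chunk's rows by transposing the block with zip(*block).
import Mathlib
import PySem

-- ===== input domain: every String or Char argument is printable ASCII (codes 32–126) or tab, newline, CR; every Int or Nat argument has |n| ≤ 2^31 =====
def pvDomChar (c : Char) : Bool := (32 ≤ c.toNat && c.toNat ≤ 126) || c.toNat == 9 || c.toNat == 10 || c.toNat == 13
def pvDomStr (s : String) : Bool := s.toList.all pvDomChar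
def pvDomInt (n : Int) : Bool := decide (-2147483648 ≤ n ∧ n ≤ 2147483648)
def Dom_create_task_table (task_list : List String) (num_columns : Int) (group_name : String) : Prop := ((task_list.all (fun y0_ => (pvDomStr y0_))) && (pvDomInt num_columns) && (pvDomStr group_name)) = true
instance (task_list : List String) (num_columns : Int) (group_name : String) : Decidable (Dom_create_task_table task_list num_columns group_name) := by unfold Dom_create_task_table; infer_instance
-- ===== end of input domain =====

-- B builds the table from global padded 10-cell columns, numbers all group names up front, and
-- transposes column blocks into rows — replacing A's per-chunk gather with running header counter;
-- objective: alternative decomposition (same cost).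

-- shared string helpers (both Pythons use s.ljust(w), "-"*w, " "*w and max(len ...))
def pvRep (c : Char) (n : Int) : String := String.ofList (List.replicate n.toNat c)

def pvLjust (s : String) (w : Int) : String :=
  s ++ String.ofList (List.replicate (w - PySem.Str.len s).toNat ' ')

-- max(len(x) for x in xs); Python raises on empty xs (excluded by Pre_), the .getD 0 is never reached there
def pvMaxLen (xs : List String) : Int :=
  ((PySem.List.max? (xs.map PySem.Str.len) (fun x => x)).getD 0)

-- ===== PORT A =====
-- body of A's `for chunk in range(total_chunks)` loop; state = (table_parts, group_names, header_count)
def pvChunkA (task_list : List String) (num_columns col_width : Int)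
    (st : List String × List String × Int) (chunk : Int) : List String × List String × Int :=
  let num_items_per_chunk := 10 * num_columns
  let chunk_start := chunk * num_items_per_chunk
  let chunk_end := min (chunk_start + num_items_per_chunk) (PySem.List.len task_list)
  let chunk_tasks := PySem.List.slice task_list (some chunk_start) (some chunk_end)
  let ncc := min num_columns (PySem.Int.floordiv (chunk_end - chunk_start + 9) 10)
  let headers := (PySem.List.pyRange 0 ncc 1).map (fun i => "Group " ++ PySem.Int.toStr (st.2.2 + i))
  let header := "| " ++ PySem.Str.join " | " (headers.map (fun h => pvLjust h col_width)) ++ " |"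
  let separator := "| " ++ PySem.Str.join " | " (headers.map (fun _ => pvRep '-' col_width)) ++ " |"
  let rows := (PySem.List.pyRange 0 10 1).foldl (fun rows row_index =>
      let row := (PySem.List.pyRange 0 ncc 1).foldl (fun row col_index =>
          let task_index := row_index + col_index * 10
          if task_index < PySem.List.len chunk_tasks then
            row ++ [pvLjust (PySem.List.pyGetD chunk_tasks task_index "") col_width]
          else
            row ++ [pvRep ' ' col_width]) []
      if row = [] then rows else rows ++ ["| " ++ PySem.Str.join " | " row ++ " |"]) []
  (st.1 ++ [PySem.Str.join "\n" ([header, separator] ++ rows)], st.2.1 ++ headers, st.2.2 + ncc)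

def create_task_table (task_list : List String) (num_columns : Int) (group_name : String) : String :=
  let headers := (PySem.List.pyRange 0 num_columns 1).map (fun i => "Group " ++ PySem.Int.toStr (i + 1))
  let col_width := max (pvMaxLen task_list) (pvMaxLen headers)
  let num_items_per_chunk := 10 * num_columns
  let total_chunks := PySem.Int.floordiv (PySem.List.len task_list + num_items_per_chunk - 1) num_items_per_chunk
  let st := (PySem.List.pyRange 0 total_chunks 1).foldl (pvChunkA task_list num_columns col_width) ([], [], 1)
  let table := PySem.Str.join "\n\n" st.1
  let group_names_output := group_name ++ ":\n" ++ PySem.Str.join "\n" (st.2.1.map (fun g => "- [ ] " ++ g))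
  group_names_output ++ "\n\n" ++ table

-- ===== PORT B =====
-- zip(*block): every column in block has exactly 10 cells (built padded below), so Python's zip
-- is exactly row r ↦ [col[r] for col in block] for r = 0..9 (exact whenever block ≠ [], i.e. on
-- every iteration of B's loop; the getD default is never read)
def pvZip10 (block : List (List String)) : List (List String) :=
  (List.range 10).map (fun r => block.map (fun col => col.getD r ""))

def create_task_table_alt (task_list : List String) (num_columns : Int) (group_name : String) : String :=
  let width := max (pvMaxLen task_list)
    (pvMaxLen ((PySem.List.pyRange 0 num_columns 1).map (fun i => "Group " ++ PySem.Int.toStr (i + 1))))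
  let blank := pvRep ' ' width
  let cols := (PySem.List.pyRange 0 (PySem.List.len task_list) 10).map (fun s =>
      let c := (PySem.List.slice task_list (some s) (some (s + 10))).map (fun t => pvLjust t width)
      c ++ List.replicate (10 - c.length) blank)
  let names := (PySem.List.pyRange 0 (PySem.List.len cols) 1).map
      (fun i => "Group " ++ PySem.Int.toStr (i + 1))
  let parts := (PySem.List.pyRange 0 (PySem.List.len cols) num_columns).foldl (fun parts k =>
      let block := PySem.List.slice cols (some k) (some (k + num_columns))
      let hdrs := PySem.List.slice names (some k) (some (k + num_columns))
      let lines := ["| " ++ PySem.Str.join " | " (hdrs.map (fun h => pvLjust h width)) ++ " |",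
                    "| " ++ PySem.Str.join " | " (List.replicate block.length (pvRep '-' width)) ++ " |"]
                   ++ (pvZip10 block).map (fun cells => "| " ++ PySem.Str.join " | " cells ++ " |")
      parts ++ [PySem.Str.join "\n" lines]) []
  group_name ++ ":\n" ++ PySem.Str.join "\n" (names.map (fun g => "- [ ] " ++ g))
    ++ "\n\n" ++ PySem.Str.join "\n\n" parts

-- ===== PRECONDITION & SPEC =====
-- Pre_ excludes exactly the inputs where A raises: an empty task_list or num_columns < 1
-- make `max()` raise ValueError (and num_columns = 0 would divide by zero).
def Pre_create_task_table (task_list : List String) (num_columns : Int) (group_name : String) : Prop :=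
  task_list ≠ [] ∧ 1 ≤ num_columns
instance (task_list : List String) (num_columns : Int) (group_name : String) : Decidable (Pre_create_task_table task_list num_columns group_name) := by unfold Pre_create_task_table; infer_instance

def pvWitness_create_task_table : List String × Int × String := (["alpha", "beta"], 1, "Groups Names")

def Spec_create_task_table (task_list : List String) (num_columns : Int) (group_name : String) (out : String) : Prop := out = create_task_table_alt task_list num_columns group_name
instance (task_list : List String) (num_columns : Int) (group_name : String) (out : String) : Decidable (Spec_create_task_table task_list num_columns group_name out) := by unfold Spec_create_task_table; infer_instance

-- ===== CLAIM (what is proved, stated in full; the proofs are below) =====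
def Claim_equal_create_task_table : Prop := ∀ (task_list : List String) (num_columns : Int) (group_name : String), Dom_create_task_table task_list num_columns group_name → Pre_create_task_table task_list num_columns group_name → Spec_create_task_table task_list num_columns group_name (create_task_table task_list num_columns group_name)


-- ===== LEMMAS AND PROOFS =====

-- canonical forms both ports are reduced to (proof-only helpers)
def pvCell (tl : List String) (w : Int) (idx : Nat) : String :=
  if idx < tl.length then pvLjust (tl.getD idx "") w else pvRep ' ' w

-- number of columns of chunk j (ncN = num_columns, C = total number of 10-cell columns)
def pvNN (ncN C j : Nat) : Nat := min ncN (C - j * ncN)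

def pvGrp (k : Nat) : String := "Group " ++ PySem.Int.toStr ((k : Int) + 1)

def pvHdrNames (ncN C j : Nat) : List String :=
  (List.range (pvNN ncN C j)).map (fun c => pvGrp (j * ncN + c))

def pvChunkStr (tl : List String) (w : Int) (ncN C j : Nat) : String :=
  PySem.Str.join "\n"
    (["| " ++ PySem.Str.join " | " ((List.range (pvNN ncN C j)).map (fun c => pvLjust (pvGrp (j * ncN + c)) w)) ++ " |",
      "| " ++ PySem.Str.join " | " (List.replicate (pvNN ncN C j) (pvRep '-' w)) ++ " |"]
     ++ (List.range 10).map (fun r =>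
          "| " ++ PySem.Str.join " | "
            ((List.range (pvNN ncN C j)).map (fun c => pvCell tl w (10 * (j * ncN + c) + r))) ++ " |"))

-- the B-side padded column q (what cols[q] evaluates to)
def pvColF (tl : List String) (w : Int) (q : Nat) : List String :=
  let c := ((tl.drop (10 * q)).take 10).map (fun t => pvLjust t w)
  c ++ List.replicate (10 - c.length) (pvRep ' ' w)

-- A's total_chunks equals ceil(C / ncN) where C = ceil(len / 10)
lemma pv_total_chunks (L ncN : Nat) (h1 : 1 ≤ ncN) :
    PySem.Int.floordiv ((L : Int) + 10 * (ncN : Int) - 1) (10 * (ncN : Int))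
      = (((L + 9) / 10 + ncN - 1) / ncN : Nat) := by
  set C := (L + 9) / 10 with hC
  set T := (C + ncN - 1) / ncN with hT
  have h10 : (0 : Int) < 10 * (ncN : Int) := by positivity
  rw [PySem.Int.floordiv_eq_iff_of_pos h10]
  have e1 := Nat.div_add_mod (C + ncN - 1) ncN
  have e2 := Nat.mod_lt (C + ncN - 1) (show 0 < ncN by omega)
  have e3 := Nat.div_add_mod (L + 9) 10
  have e4 := Nat.mod_lt (L + 9) (show 0 < 10 by norm_num)
  rw [← hT] at e1
  have g1 : ((T : Int)) * (10 * (ncN : Int)) = 10 * ((ncN * T : Nat) : Int) := by push_cast; ring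
  have g2 : ((T : Int) + 1) * (10 * (ncN : Int)) = 10 * ((ncN * T : Nat) : Int) + 10 * (ncN : Int) := by
    push_cast; ring
  rw [g1, g2]
  generalize hP : ncN * T = P at e1 ⊢
  omega

-- A's rows foldl, as a map (rows are never empty since ncc >= 1)
lemma pv_rowsA_map (N : Int) (hN : 1 ≤ N) (ch : List String) (w : Int) :
    (PySem.List.pyRange 0 10 1).foldl (fun rows row_index =>
        let row := (PySem.List.pyRange 0 N 1).foldl (fun row col_index =>
            let task_index := row_index + col_index * 10
            if task_index < (ch.length : Int) then
              row ++ [pvLjust (PySem.List.pyGetD ch task_index "") w]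
            else
              row ++ [pvRep ' ' w]) []
        if row = [] then rows else rows ++ ["| " ++ PySem.Str.join " | " row ++ " |"]) []
    = (PySem.List.pyRange 0 10 1).map (fun ri => "| " ++ PySem.Str.join " | "
        ((PySem.List.pyRange 0 N 1).map (fun ci =>
          if ri + ci * 10 < (ch.length : Int) then pvLjust (PySem.List.pyGetD ch (ri + ci * 10) "") w
          else pvRep ' ' w)) ++ " |") := by
  have inner : ∀ ri : Int, (PySem.List.pyRange 0 N 1).foldl (fun row col_index =>
        let task_index := ri + col_index * 10
        if task_index < (ch.length : Int) then
          row ++ [pvLjust (PySem.List.pyGetD ch task_index "") w]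
        else
          row ++ [pvRep ' ' w]) []
      = (PySem.List.pyRange 0 N 1).map (fun ci =>
          if ri + ci * 10 < (ch.length : Int) then pvLjust (PySem.List.pyGetD ch (ri + ci * 10) "") w
          else pvRep ' ' w) := by
    intro ri
    rw [PySem.List.foldl_congr_mem _ _ (fun row ci =>
        row ++ [if ri + ci * 10 < (ch.length : Int) then pvLjust (PySem.List.pyGetD ch (ri + ci * 10) "") w
                else pvRep ' ' w]) _ ?_]
    · exact PySem.List.foldl_append_singleton_eq_map _ _ []
    · intro acc x _
      by_cases h : ri + x * 10 < (ch.length : Int) <;>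
        simp only [h, if_true, if_false]
  rw [PySem.List.foldl_congr_mem _ _ (fun rows ri =>
      rows ++ ["| " ++ PySem.Str.join " | " ((PySem.List.pyRange 0 N 1).map (fun ci =>
        if ri + ci * 10 < (ch.length : Int) then pvLjust (PySem.List.pyGetD ch (ri + ci * 10) "") w
        else pvRep ' ' w)) ++ " |"]) _ ?_]
  · exact PySem.List.foldl_append_singleton_eq_map _ _ []
  · intro acc ri _
    simp only []
    rw [inner ri]
    rw [if_neg ?_]
    intro hemp
    have := congrArg List.length hemp
    simp [PySem.List.length_pyRange_one] at this
    omega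

-- one step of A's chunk loop, in canonical form
set_option maxHeartbeats 1000000 in
lemma pv_chunkA_eq (tl : List String) (w : Int) (ncN C T m : Nat) (h1 : 1 ≤ ncN)
    (hC : C = (tl.length + 9) / 10) (hT : T = (C + ncN - 1) / ncN) (hm : m < T)
    (p n : List String) :
    pvChunkA tl (ncN : Int) w (p, n, 1 + ((m * ncN : Nat) : Int)) (m : Int)
      = (p ++ [pvChunkStr tl w ncN C m], n ++ pvHdrNames ncN C m, 1 + ((min ((m + 1) * ncN) C : Nat) : Int)) := by
  -- arithmetic groundwork
  have e1 := Nat.div_add_mod (C + ncN - 1) ncN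
  rw [← hT] at e1
  have e2 := Nat.mod_lt (C + ncN - 1) (show 0 < ncN by omega)
  have h3 : (T - 1) * ncN + ncN = T * ncN := by
    cases T with
    | zero => omega
    | succ t => simp [Nat.succ_mul]
  have hmul : m * ncN ≤ (T - 1) * ncN := Nat.mul_le_mul_right _ (by omega)
  have h4 : m * ncN + ncN ≤ ncN * T := by rw [mul_comm ncN T]; omega
  have h5 : m * ncN < C := by omega
  have e3 := Nat.div_add_mod (tl.length + 9) 10
  rw [← hC] at e3
  have e4 := Nat.mod_lt (tl.length + 9) (show (0 : Nat) < 10 by norm_num)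
  have h10a : 10 * (m * ncN) < tl.length := by omega
  simp only [pvChunkA, PySem.List.len_eq]
  have ecs : (m : Int) * (10 * (ncN : Int)) = ((10 * (m * ncN) : Nat) : Int) := by push_cast; ring
  have ece : min (((10 * (m * ncN) : Nat) : Int) + 10 * (ncN : Int)) (tl.length : Int)
      = ((min (10 * (m * ncN) + 10 * ncN) tl.length : Nat) : Int) := by push_cast; omega
  rw [ecs, ece, PySem.List.slice_natCast]
  set A0 := 10 * (m * ncN) with hA0
  set E0 := min (10 * (m * ncN) + 10 * ncN) tl.length with hE0
  set ch : List String := (tl.drop A0).take (E0 - A0) with hch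
  have hchlen : ch.length = E0 - A0 := by
    simp [hch, List.length_take, List.length_drop]; omega
  have hncc : min ((ncN : Int)) (PySem.Int.floordiv (((E0 : Nat) : Int) - ((A0 : Nat) : Int) + 9) 10)
      = ((pvNN ncN C m : Nat) : Int) := by
    rw [PySem.Int.floordiv_eq_ediv_of_pos (by norm_num)]
    simp only [pvNN]
    omega
  rw [hncc]
  have hN1 : 1 ≤ pvNN ncN C m := by simp only [pvNN]; omega
  rw [pv_rowsA_map _ (by exact_mod_cast hN1)]
  -- the headers list, canonically
  have hhdr : (PySem.List.pyRange 0 ((pvNN ncN C m : Nat) : Int) 1).map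
        (fun i => "Group " ++ PySem.Int.toStr (1 + ((m * ncN : Nat) : Int) + i))
      = pvHdrNames ncN C m := by
    simp only [pvHdrNames, pvGrp]
    rw [PySem.List.pyRange_zero_natCast, List.map_map]
    apply List.map_congr_left
    intro c _
    simp only [Function.comp_apply]
    congr 2
    push_cast; ring
  have hljust : ((PySem.List.pyRange 0 ((pvNN ncN C m : Nat) : Int) 1).map
        (fun i => "Group " ++ PySem.Int.toStr (1 + ((m * ncN : Nat) : Int) + i))).map (fun h => pvLjust h w)
      = (List.range (pvNN ncN C m)).map (fun c => pvLjust (pvGrp (m * ncN + c)) w) := by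
    rw [hhdr]; simp only [pvHdrNames, List.map_map]; rfl
  have hsep : ((PySem.List.pyRange 0 ((pvNN ncN C m : Nat) : Int) 1).map
        (fun i => "Group " ++ PySem.Int.toStr (1 + ((m * ncN : Nat) : Int) + i))).map
          (fun _ => pvRep '-' w)
      = List.replicate (pvNN ncN C m) (pvRep '-' w) := by
    rw [hhdr, List.map_const']
    simp [pvHdrNames]
  have hrows : (PySem.List.pyRange 0 10 1).map (fun ri => "| " ++ PySem.Str.join " | "
        ((PySem.List.pyRange 0 ((pvNN ncN C m : Nat) : Int) 1).map (fun ci =>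
          if ri + ci * 10 < (ch.length : Int) then pvLjust (PySem.List.pyGetD ch (ri + ci * 10) "") w
          else pvRep ' ' w)) ++ " |")
      = (List.range 10).map (fun r => "| " ++ PySem.Str.join " | "
          ((List.range (pvNN ncN C m)).map (fun c => pvCell tl w (10 * (m * ncN + c) + r))) ++ " |") := by
    rw [PySem.List.pyRange_one 0 10]
    simp only [show ((10 : Int) - 0).toNat = 10 from rfl, List.map_map]
    apply List.map_congr_left
    intro r hr
    simp only [List.mem_range] at hr
    simp only [Function.comp_apply]
    refine congrArg₂ (fun x y => x ++ y)
      (congrArg (fun x => "| " ++ x) (congrArg (PySem.Str.join " | ") ?_)) rfl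
    rw [PySem.List.pyRange_zero_natCast, List.map_map]
    apply List.map_congr_left
    intro c hcm
    simp only [List.mem_range] at hcm
    simp only [Function.comp_apply]
    have hcN : c < ncN ∧ c < C - m * ncN := by
      have := hcm; simp only [pvNN] at this; omega
    have hidx : (0 + (r : Int)) + ((c : Int)) * 10 = ((r + c * 10 : Nat) : Int) := by push_cast; ring
    rw [hidx, PySem.List.pyGetD_natCast]
    by_cases hin : (10 * (m * ncN + c) + r) < tl.length
    · have hlt : r + c * 10 < ch.length := by omega
      rw [if_pos (by exact_mod_cast hlt)]
      simp only [pvCell, if_pos hin]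
      congr 1
      rw [List.getD_eq_getElem _ _ hlt, List.getD_eq_getElem _ _ hin]
      simp only [hch, List.getElem_take, List.getElem_drop]
      congr 1
      omega
    · have hge : ¬ (r + c * 10 < ch.length) := by omega
      rw [if_neg (by exact_mod_cast hge)]
      simp only [pvCell, if_neg hin]
  refine congrArg₂ Prod.mk ?_ (congrArg₂ Prod.mk ?_ ?_)
  · -- table part
    refine congrArg (fun s => p ++ [s]) ?_
    simp only [pvChunkStr]
    rw [hljust, hsep, hrows]
  · -- group names
    rw [hhdr]
  · -- header count
    have h7 : min ((m + 1) * ncN) C = m * ncN + pvNN ncN C m := by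
      have hx : (m + 1) * ncN = m * ncN + ncN := by ring
      simp only [pvNN]; omega
    rw [h7]
    push_cast; ring

-- A's whole fold, in canonical form
lemma pv_foldA (tl : List String) (w : Int) (ncN C T : Nat) (h1 : 1 ≤ ncN)
    (hC : C = (tl.length + 9) / 10) (hT : T = (C + ncN - 1) / ncN) :
    ∀ m, m ≤ T →
      (List.range m).foldl (fun st (k : Nat) => pvChunkA tl (ncN : Int) w st (k : Int)) ([], [], 1)
        = ((List.range m).map (pvChunkStr tl w ncN C),
           (List.range m).flatMap (pvHdrNames ncN C),
           1 + ((min (m * ncN) C : Nat) : Int)) := by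
  intro m
  induction m with
  | zero => intro _; simp
  | succ m ih =>
    intro hm
    have e1 := Nat.div_add_mod (C + ncN - 1) ncN
    rw [← hT] at e1
    have e2 := Nat.mod_lt (C + ncN - 1) (show 0 < ncN by omega)
    have h3 : (T - 1) * ncN + ncN = T * ncN := by
      cases T with
      | zero => omega
      | succ t => simp [Nat.succ_mul]
    have hmul : m * ncN ≤ (T - 1) * ncN := Nat.mul_le_mul_right _ (by omega)
    have h4 : m * ncN + ncN ≤ ncN * T := by rw [mul_comm ncN T]; omega
    have h5 : min (m * ncN) C = m * ncN := by omega
    rw [List.range_succ, List.foldl_append, ih (by omega)]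
    simp only [List.foldl_cons, List.foldl_nil]
    rw [h5, pv_chunkA_eq tl w ncN C T m h1 hC hT (by omega)]
    simp

-- the group names across chunks are Group 1 .. Group C
lemma pv_names_flat (ncN C T : Nat) (h1 : 1 ≤ ncN) (hT : T = (C + ncN - 1) / ncN) :
    ∀ m, m ≤ T → (List.range m).flatMap (pvHdrNames ncN C)
      = (List.range (min (m * ncN) C)).map pvGrp := by
  intro m
  induction m with
  | zero => intro _; simp
  | succ m ih =>
    intro hm
    have e1 := Nat.div_add_mod (C + ncN - 1) ncN
    rw [← hT] at e1
    have e2 := Nat.mod_lt (C + ncN - 1) (show 0 < ncN by omega)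
    have h3 : (T - 1) * ncN + ncN = T * ncN := by
      cases T with
      | zero => omega
      | succ t => simp [Nat.succ_mul]
    have hmul : m * ncN ≤ (T - 1) * ncN := Nat.mul_le_mul_right _ (by omega)
    have h4 : m * ncN + ncN ≤ ncN * T := by rw [mul_comm ncN T]; omega
    have h5 : m * ncN < C := by omega
    rw [List.range_succ, List.flatMap_append, ih (by omega)]
    simp only [List.flatMap_cons, List.flatMap_nil, List.append_nil]
    have h6 : min (m * ncN) C = m * ncN := by omega
    have h7 : min ((m + 1) * ncN) C = m * ncN + pvNN ncN C m := by
      have hx : (m + 1) * ncN = m * ncN + ncN := by ring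
      simp only [pvNN]; omega
    rw [h6, h7, List.range_add, List.map_append, List.map_map]
    simp [pvHdrNames, Function.comp]

-- B's cols list, in canonical form
lemma pv_cols_eq (tl : List String) (w : Int) (C : Nat) (hC : C = (tl.length + 9) / 10)
    (hL : tl ≠ []) :
    (PySem.List.pyRange 0 ((tl.length : Int)) 10).map (fun s =>
        (PySem.List.slice tl (some s) (some (s + 10))).map (fun t => pvLjust t w)
        ++ List.replicate
            (10 - ((PySem.List.slice tl (some s) (some (s + 10))).map (fun t => pvLjust t w)).length)
            (pvRep ' ' w))
      = (List.range C).map (pvColF tl w) := by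
  have hL0 : 0 < tl.length := List.length_pos_of_ne_nil hL
  rw [PySem.List.pyRange_of_pos 0 _ (by norm_num)]
  rw [if_pos (by exact_mod_cast hL0)]
  have hc2 : ((tl.length : Int) - 0 + 10 - 1) / 10 = ((((tl.length + 9) / 10 : Nat)) : Int) := by
    omega
  rw [hc2, Int.toNat_natCast, ← hC, List.map_map]
  apply List.map_congr_left
  intro k _
  simp only [Function.comp_apply]
  have e : (0 + 10 * (k : Int)) = ((10 * k : Nat) : Int) := by push_cast; ring
  have e2 : ((10 * k : Nat) : Int) + 10 = ((10 * k : Nat) : Int) + ((10 : Nat) : Int) := by norm_num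
  rw [e, e2, PySem.List.slice_natCast_add]
  rfl

-- a cell of a padded column
lemma pv_colF_getD (tl : List String) (w : Int) (q r : Nat) (hr : r < 10) :
    (pvColF tl w q).getD r "" = pvCell tl w (10 * q + r) := by
  simp only [pvColF, pvCell]
  set c : List String := ((tl.drop (10 * q)).take 10).map (fun t => pvLjust t w) with hc
  have hcl : c.length = min 10 (tl.length - 10 * q) := by
    simp [hc, List.length_take, List.length_drop]
  by_cases h : r < c.length
  · rw [List.getD_append _ _ _ _ h, List.getD_eq_getElem _ _ h]
    have h2 : 10 * q + r < tl.length := by omega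
    rw [if_pos h2]
    simp only [hc, List.getElem_map, List.getElem_take, List.getElem_drop]
    rw [List.getD_eq_getElem _ _ h2]
  · rw [List.getD_append_right _ _ _ _ (by omega)]
    have h3 : ¬ 10 * q + r < tl.length := by omega
    rw [if_neg h3, List.getD_replicate _ (by omega)]

-- a block/names slice of a canonical range-map list
lemma pv_slice_map_range {α : Type} (f : Nat → α) (C a b : Nat) :
    PySem.List.slice ((List.range C).map f) (some ((a : Nat) : Int)) (some (((a : Nat) : Int) + ((b : Nat) : Int)))
      = (List.range (min b (C - a))).map (fun c => f (a + c)) := by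
  rw [PySem.List.slice_natCast_add]
  apply List.ext_getElem
  · simp [List.length_take, List.length_drop]
  · intro i h1 h2
    simp [List.getElem_take, List.getElem_drop, List.getElem_map, List.getElem_range]

-- one step of B's chunk loop, in canonical form
lemma pv_chunkB_eq (tl : List String) (w : Int) (ncN C T j : Nat) (h1 : 1 ≤ ncN)
    (hC : C = (tl.length + 9) / 10) (hT : T = (C + ncN - 1) / ncN) (hj : j < T) :
    (let block := PySem.List.slice ((List.range C).map (pvColF tl w)) (some (0 + (ncN : Int) * (j : Int))) (some (0 + (ncN : Int) * (j : Int) + (ncN : Int)))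
     let hdrs := PySem.List.slice ((List.range C).map pvGrp) (some (0 + (ncN : Int) * (j : Int))) (some (0 + (ncN : Int) * (j : Int) + (ncN : Int)))
     let lines := ["| " ++ PySem.Str.join " | " (hdrs.map (fun h => pvLjust h w)) ++ " |",
                   "| " ++ PySem.Str.join " | " (List.replicate block.length (pvRep '-' w)) ++ " |"]
                  ++ (pvZip10 block).map (fun cells => "| " ++ PySem.Str.join " | " cells ++ " |")
     PySem.Str.join "\n" lines)
    = pvChunkStr tl w ncN C j := by
  have e1 := Nat.div_add_mod (C + ncN - 1) ncN
  rw [← hT] at e1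
  have e2 := Nat.mod_lt (C + ncN - 1) (show 0 < ncN by omega)
  have h3 : (T - 1) * ncN + ncN = T * ncN := by
    cases T with
    | zero => omega
    | succ t => simp [Nat.succ_mul]
  have hmul : j * ncN ≤ (T - 1) * ncN := Nat.mul_le_mul_right _ (by omega)
  have h4 : j * ncN + ncN ≤ ncN * T := by rw [mul_comm ncN T]; omega
  have h5 : j * ncN < C := by omega
  have eK : (0 + (ncN : Int) * (j : Int)) = ((ncN * j : Nat) : Int) := by push_cast; ring
  simp only [eK, pv_slice_map_range]
  have hmc : min ncN (C - ncN * j) = pvNN ncN C j := by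
    simp only [pvNN, Nat.mul_comm ncN j]
  simp only [hmc, pvChunkStr, pvZip10]
  refine congrArg (PySem.Str.join "\n") ?_
  refine congrArg₂ (fun (x : List String) y => x ++ y) ?_ ?_
  · refine congrArg₂ (fun (a : String) (b : String) => [a, b]) ?_ ?_
    · refine congrArg₂ (fun x y => x ++ y)
        (congrArg (fun x => "| " ++ x) (congrArg (PySem.Str.join " | ") ?_)) rfl
      rw [List.map_map]
      apply List.map_congr_left
      intro c _
      simp only [Function.comp_apply, Nat.mul_comm ncN j]
    · refine congrArg₂ (fun x y => x ++ y)
        (congrArg (fun x => "| " ++ x) (congrArg (PySem.Str.join " | ") ?_)) rfl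
      congr 1
      simp
  · rw [List.map_map]
    apply List.map_congr_left
    intro r hr
    simp only [List.mem_range] at hr
    simp only [Function.comp_apply]
    refine congrArg₂ (fun x y => x ++ y)
      (congrArg (fun x => "| " ++ x) (congrArg (PySem.Str.join " | ") ?_)) rfl
    rw [List.map_map]
    apply List.map_congr_left
    intro c _
    simp only [Function.comp_apply]
    rw [pv_colF_getD tl w _ r hr, Nat.mul_comm ncN j]

-- ===== VERDICT (by name: the statement is the Claim_ definition above) =====
theorem create_task_table_spec : Claim_equal_create_task_table := by
  intro tl nc gn _ hpre
  obtain ⟨hne, hnc⟩ := hpre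
  obtain ⟨ncN, rfl⟩ : ∃ k : Nat, nc = (k : Int) := ⟨nc.toNat, by omega⟩
  have h1 : 1 ≤ ncN := by exact_mod_cast hnc
  have hL0 : 0 < tl.length := List.length_pos_of_ne_nil hne
  unfold Spec_create_task_table create_task_table create_task_table_alt
  simp only [PySem.List.len_eq]
  set C := (tl.length + 9) / 10 with hC
  set T := (C + ncN - 1) / ncN with hT
  set w := max (pvMaxLen tl)
    (pvMaxLen ((PySem.List.pyRange 0 (ncN : Int) 1).map
      (fun i => "Group " ++ PySem.Int.toStr (i + 1)))) with hw
  have e3 := Nat.div_add_mod (tl.length + 9) 10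
  rw [← hC] at e3
  have e4 := Nat.mod_lt (tl.length + 9) (show (0 : Nat) < 10 by norm_num)
  have hC1 : 1 ≤ C := by omega
  have e1 := Nat.div_add_mod (C + ncN - 1) ncN
  rw [← hT] at e1
  have e2 := Nat.mod_lt (C + ncN - 1) (show 0 < ncN by omega)
  -- A's chunk count
  rw [pv_total_chunks tl.length ncN h1]
  rw [show (((tl.length + 9) / 10 + ncN - 1) / ncN : Nat) = T by rw [hT, hC]]
  rw [PySem.List.pyRange_zero_natCast, List.foldl_map]
  rw [pv_foldA tl w ncN C T h1 hC hT T le_rfl]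
  have hminTC : min (T * ncN) C = C := by
    have : ncN * T + (C + ncN - 1) % ncN = C + ncN - 1 := e1
    have h' : C ≤ T * ncN := by rw [mul_comm T ncN]; omega
    omega
  have hnames := pv_names_flat ncN C T h1 hT T le_rfl
  rw [hminTC] at hnames
  rw [hnames]
  -- B's cols and names
  rw [pv_cols_eq tl w C hC hne]
  have hlenc : ((List.range C).map (pvColF tl w)).length = C := by simp
  rw [hlenc]
  have hnamesB : (PySem.List.pyRange 0 (C : Int) 1).map
      (fun i => "Group " ++ PySem.Int.toStr (i + 1)) = (List.range C).map pvGrp := by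
    rw [PySem.List.pyRange_zero_natCast, List.map_map]
    rfl
  rw [hnamesB]
  -- B's fold
  rw [PySem.List.foldl_append_singleton_eq_map
    (fun k =>
      PySem.Str.join "\n"
        (["| " ++ PySem.Str.join " | "
            ((PySem.List.slice ((List.range C).map pvGrp) (some k) (some (k + (ncN : Int)))).map
              (fun h => pvLjust h w)) ++ " |",
          "| " ++ PySem.Str.join " | "
            (List.replicate (PySem.List.slice ((List.range C).map (pvColF tl w)) (some k)
              (some (k + (ncN : Int)))).length (pvRep '-' w)) ++ " |"]
         ++ (pvZip10 (PySem.List.slice ((List.range C).map (pvColF tl w)) (some k)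
              (some (k + (ncN : Int))))).map
            (fun cells => "| " ++ PySem.Str.join " | " cells ++ " |")))]
  rw [PySem.List.pyRange_of_pos 0 (C : Int) (show (0 : Int) < (ncN : Int) by exact_mod_cast h1)]
  rw [if_pos (by exact_mod_cast hC1)]
  rw [show ((C : Int) - 0 + (ncN : Int) - 1) / (ncN : Int) = ((T : Nat) : Int) by
    rw [show ((C : Int) - 0 + (ncN : Int) - 1) = ((C + ncN - 1 : Nat) : Int) by omega]
    rw [← Int.natCast_ediv, hT]]
  rw [Int.toNat_natCast, List.map_map]
  -- the chunk parts coincide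
  have hparts : (List.range T).map
        ((fun k =>
          PySem.Str.join "\n"
            (["| " ++ PySem.Str.join " | "
                ((PySem.List.slice ((List.range C).map pvGrp) (some k) (some (k + (ncN : Int)))).map
                  (fun h => pvLjust h w)) ++ " |",
              "| " ++ PySem.Str.join " | "
                (List.replicate (PySem.List.slice ((List.range C).map (pvColF tl w)) (some k)
                  (some (k + (ncN : Int)))).length (pvRep '-' w)) ++ " |"]
             ++ (pvZip10 (PySem.List.slice ((List.range C).map (pvColF tl w)) (some k)
                  (some (k + (ncN : Int))))).map
                (fun cells => "| " ++ PySem.Str.join " | " cells ++ " |"))) ∘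
          (fun (k : Nat) => 0 + (ncN : Int) * (k : Int)))
      = (List.range T).map (pvChunkStr tl w ncN C) := by
    apply List.map_congr_left
    intro j hj
    simp only [List.mem_range] at hj
    simp only [Function.comp_apply]
    exact pv_chunkB_eq tl w ncN C T j h1 hC hT hj
  rw [List.map_map, hparts]
  simp
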